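-- pv_equiv track=rewrite | github.com/pingqLIN/terminal-bridge-v2 | tb2/diff.py | diff_new_lines
-- ===== SOURCE A (Python) =====
-- from typing import List, Tuple
--
-- def diff_new_lines(prev: List[str], curr: List[str]) -> List[str]:
--     """Return lines in *curr* that are new compared to *prev*.
--
--     Uses hash-based suffix matching — O(n) average case instead of O(n^2).
--     """
--     if not prev:
--         return curr
--     if not curr:
--         return []
--
--     # Hash each line for fast comparison.
--     prev_hashes = [hash(ln) for ln in prev]
--     curr_hashes = [hash(ln) for ln in curr]
--
--     max_k = min(len(prev), len(curr))
--
--     # Find the largest k where the last k lines of prev appear somewhere in curr.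
--     # Start from max_k downward — first match wins.
--     for k in range(max_k, 0, -1):
--         suffix_hashes = prev_hashes[-k:]
--
--         # Scan curr from end to find where this suffix starts.
--         for i in range(len(curr) - k, -1, -1):
--             if curr_hashes[i: i + k] == suffix_hashes:
--                 # Verify with actual strings to avoid hash collisions.
--                 if curr[i: i + k] == prev[-k:]:
--                     return curr[i + k:]
--
--         # Early exit: if k is large and no match, smaller k won't help for stable diffs.
--         if k < max_k // 2:
--             break
--
--     return curr
-- ===== SOURCE B (Python) =====
-- from typing import List
--
--
-- def diff_new_lines(prev: List[str], curr: List[str]) -> List[str]: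
--     """Return lines in *curr* that are new compared to *prev*.
--
--     Single backward sweep: for every boundary in curr (rightmost first),
--     count how many lines immediately before it coincide with the tail of
--     prev, and cut curr after the longest such run.  The sweep stops as soon
--     as no remaining boundary could beat the best run found.
--     """
--     n = len(curr)
--     best, cut = 0, 0
--     for end in range(n, 0, -1):
--         if best >= end:
--             break
--         k = 0
--         while k < end and k < len(prev) and curr[end - 1 - k] == prev[-1 - k]:
--             k += 1
--         if k > best:
--             best, cut = k, end
--     return curr[cut:]
-- ===== Notes on version B (the rewrite author's own statement) =====
-- stated objective: faster
-- what changed: A searches suffix lengths k downward, rescanning curr with O(k) slice comparisons for each k; B makes one backward sweep over the boundaries of curr, measuring the common run with prev's tail at each boundary directly and keeping the longest, with no early-exit cutoff.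
-- intended difference: On inputs where some nonempty tail of prev occurs in curr but only with length below max(1, min(len(prev),len(curr))//2 - 1), A's halving early exit gives up and returns all of curr, while B returns the lines after the longest such match; the early exit was meant as a pure speed shortcut ('smaller k won't help'), so B's cut is the intended result. — e.g. on diff_new_lines(["a", "b", "c", "d", "e", "f"], ["x", "f", "1", "2", "3", "4"]): A returns ["x", "f", "1", "2", "3", "4"], B returns ["1", "2", "3", "4"]
import Mathlib
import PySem

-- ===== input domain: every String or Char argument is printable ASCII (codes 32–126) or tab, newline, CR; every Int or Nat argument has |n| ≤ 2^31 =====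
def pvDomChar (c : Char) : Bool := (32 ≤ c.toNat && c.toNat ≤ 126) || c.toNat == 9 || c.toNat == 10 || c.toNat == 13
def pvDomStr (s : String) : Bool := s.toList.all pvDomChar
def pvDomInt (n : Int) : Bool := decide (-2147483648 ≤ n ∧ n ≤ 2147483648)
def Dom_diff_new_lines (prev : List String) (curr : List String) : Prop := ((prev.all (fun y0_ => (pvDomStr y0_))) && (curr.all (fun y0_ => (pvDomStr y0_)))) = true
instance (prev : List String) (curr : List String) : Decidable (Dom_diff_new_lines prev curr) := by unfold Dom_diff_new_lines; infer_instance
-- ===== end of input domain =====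

-- B replaces A's descending search over suffix lengths (each length rescanning curr with slice
-- compares) by ONE backward sweep over the boundaries of curr that measures each common run with
-- prev's tail directly and keeps the longest; B drops A's halving early exit, so on inputs where
-- only a short tail of prev reappears A returns all of curr while B cuts after that match (the
-- stated intended difference D_ below).
-- Note: Python's `hash` layer in A is ported with Lean's `hash`; A verifies every hash hit with
-- the real strings, so A's result never depends on the hash function.

-- ===== PORT A =====
def diffInner (prev curr : List String) (currHashes suffixHashes : List UInt64) (k : Int) :
    List Int → Option (List String)
  | [] => none
  | i :: rest =>
    if PySem.List.slice currHashes (some i) (some (i + k)) = suffixHashes then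
      if PySem.List.slice curr (some i) (some (i + k)) = PySem.List.slice prev (some (-k)) none then
        some (PySem.List.slice curr (some (i + k)) none)
      else diffInner prev curr currHashes suffixHashes k rest
    else diffInner prev curr currHashes suffixHashes k rest

def diffOuter (prev curr : List String) (prevHashes currHashes : List UInt64) (maxK : Int) :
    List Int → Option (List String)
  | [] => none
  | k :: rest =>
    match diffInner prev curr currHashes (PySem.List.slice prevHashes (some (-k)) none) k
        (PySem.List.pyRange (PySem.List.len curr - k) (-1) (-1)) with
    | some res => some res
    | none =>
      if k < PySem.Int.floordiv maxK 2 then none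
      else diffOuter prev curr prevHashes currHashes maxK rest

def diff_new_lines (prev : List String) (curr : List String) : List String :=
  if prev = [] then curr
  else if curr = [] then []
  else
    let prevHashes := prev.map hash
    let currHashes := curr.map hash
    let maxK := min (PySem.List.len prev) (PySem.List.len curr)
    match diffOuter prev curr prevHashes currHashes maxK (PySem.List.pyRange maxK 0 (-1)) with
    | some res => res
    | none => curr

-- ===== PORT B =====
-- the inner `while` of Source B: how many lines immediately before boundary `e` of curr agree with
-- the tail of prev (the indexing is exact: both indices are in range whenever the guard holds)
def runLen (prev curr : List String) (e k : Nat) : Nat :=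
  if k < e ∧ k < prev.length ∧
      PySem.List.pyGet? curr ((e : Int) - 1 - (k : Int)) = PySem.List.pyGet? prev (-1 - (k : Int))
  then runLen prev curr e (k + 1)
  else k
termination_by e - k
decreasing_by omega

-- the backward `for end in range(n, 0, -1)` of Source B with its `break`
def altGo (prev curr : List String) (best cut : Nat) : Nat → Nat × Nat
  | 0 => (best, cut)
  | e + 1 =>
    if e + 1 ≤ best then (best, cut)
    else
      let k := runLen prev curr (e + 1) 0
      if best < k then altGo prev curr k (e + 1) e
      else altGo prev curr best cut e

def diff_new_lines_alt (prev : List String) (curr : List String) : List String :=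
  let s := altGo prev curr 0 0 curr.length
  PySem.List.slice curr (some ((s.2 : Nat) : Int)) none

-- ===== PRECONDITION & SPEC =====
-- On inputs where some nonempty tail of prev reappears in curr but only shorter than
-- max(1, min(len(prev),len(curr))//2 - 1) lines of it do, A's halving early exit gives up and
-- returns all of curr, while B returns the lines after the longest such match; A's early exit was
-- meant as a pure speed shortcut ("smaller k won't help"), so B's cut is the intended result.
def D_diff_new_lines (prev : List String) (curr : List String) : Prop :=
  prev ≠ [] ∧
  (prev.drop (prev.length - 1)) <:+: curr ∧
  ¬ ((prev.drop (prev.length - max 1 (min prev.length curr.length / 2 - 1))) <:+: curr)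
instance (prev : List String) (curr : List String) : Decidable (D_diff_new_lines prev curr) := by
  unfold D_diff_new_lines; infer_instance

def Spec_diff_new_lines (prev : List String) (curr : List String) (out : List String) : Prop :=
  ¬ D_diff_new_lines prev curr → out = diff_new_lines_alt prev curr
instance (prev : List String) (curr : List String) (out : List String) : Decidable (Spec_diff_new_lines prev curr out) := by unfold Spec_diff_new_lines; infer_instance

def pvDiffWitness_diff_new_lines : List String × List String :=
  (["a", "b", "c", "d", "e", "f"], ["x", "f", "1", "2", "3", "4"])
def pvDiffWitnessOut_diff_new_lines : (List String) × (List String) :=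
  (["x", "f", "1", "2", "3", "4"], ["1", "2", "3", "4"])

-- ===== CLAIM (what is proved, stated in full; the proofs are below) =====
def Claim_unchanged_diff_new_lines : Prop := ∀ (prev : List String) (curr : List String), Dom_diff_new_lines prev curr → Spec_diff_new_lines prev curr (diff_new_lines prev curr)
def Claim_changed_diff_new_lines : Prop := Dom_diff_new_lines (pvDiffWitness_diff_new_lines.1) (pvDiffWitness_diff_new_lines.2) ∧ D_diff_new_lines (pvDiffWitness_diff_new_lines.1) (pvDiffWitness_diff_new_lines.2) ∧ diff_new_lines (pvDiffWitness_diff_new_lines.1) (pvDiffWitness_diff_new_lines.2) = pvDiffWitnessOut_diff_new_lines.1 ∧ diff_new_lines_alt (pvDiffWitness_diff_new_lines.1) (pvDiffWitness_diff_new_lines.2) = pvDiffWitnessOut_diff_new_lines.2 ∧ pvDiffWitnessOut_diff_new_lines.1 ≠ pvDiffWitnessOut_diff_new_lines.2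
def Claim_exact_diff_new_lines : Prop := ∀ (prev : List String) (curr : List String), Dom_diff_new_lines prev curr → D_diff_new_lines prev curr → diff_new_lines prev curr ≠ diff_new_lines_alt prev curr

-- ===== LEMMAS AND PROOFS =====

-- longest-common-prefix length of a zipped pair of lists
def lcpZ {α : Type} [DecidableEq α] : List (α × α) → Nat
  | [] => 0
  | (x, y) :: rest => if x = y then lcpZ rest + 1 else 0

theorem lcpZ_ge_iff {α : Type} [DecidableEq α] (k : Nat) (xs ys : List α) :
    k ≤ lcpZ (xs.zip ys) ↔ k ≤ xs.length ∧ k ≤ ys.length ∧ xs.take k = ys.take k := by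
  induction k generalizing xs ys with
  | zero => simp
  | succ k ih =>
    cases xs with
    | nil => simp [lcpZ]
    | cons x xs =>
      cases ys with
      | nil => simp [lcpZ]
      | cons y ys =>
        by_cases h : x = y
        · subst h
          simp [lcpZ, Nat.succ_le_succ_iff, List.take_succ_cons, ih]
        · simp [lcpZ, h]

theorem lcpZ_le_left {α : Type} [DecidableEq α] (xs ys : List α) :
    lcpZ (xs.zip ys) ≤ xs.length :=
  ((lcpZ_ge_iff _ xs ys).1 le_rfl).1

theorem lcpZ_le_right {α : Type} [DecidableEq α] (xs ys : List α) :
    lcpZ (xs.zip ys) ≤ ys.length :=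
  ((lcpZ_ge_iff _ xs ys).1 le_rfl).2.1

-- z(p): match length of reversed curr at offset p against reversed prev
def Zf (prev curr : List String) (p : Nat) : Nat :=
  lcpZ ((curr.reverse.drop p).zip prev.reverse)

theorem Zf_le_sub (prev curr : List String) (p : Nat) :
    Zf prev curr p ≤ curr.length - p := by
  have := lcpZ_le_left (curr.reverse.drop p) prev.reverse
  simpa [Zf] using this

theorem Zf_le_prev (prev curr : List String) (p : Nat) :
    Zf prev curr p ≤ prev.length := by
  have := lcpZ_le_right (curr.reverse.drop p) prev.reverse
  simpa [Zf] using this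

-- the A-side window condition, in lcp language
theorem acond_iff (prev curr : List String) (ii kk : Nat) (hk : 0 < kk)
    (hkp : kk ≤ prev.length) (hik : ii + kk ≤ curr.length) :
    (PySem.List.slice curr (some (ii : Int)) (some ((ii : Int) + (kk : Int))) =
      PySem.List.slice prev (some (-(kk : Int))) none) ↔
    kk ≤ Zf prev curr (curr.length - ii - kk) := by
  rw [PySem.List.slice_natCast_add, PySem.List.slice_from_neg_natCast _ _ hk, Zf, lcpZ_ge_iff]
  have e1 : curr.length - (curr.length - ii - kk) = ii + kk := by omega
  have hdrop : curr.reverse.drop (curr.length - ii - kk) = (curr.take (ii + kk)).reverse := by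
    rw [List.drop_reverse, e1]
  have e2 : (curr.take (ii + kk)).length - kk = ii := by simp; omega
  have e3 : ii + kk - ii = kk := by omega
  have htake : (curr.take (ii + kk)).reverse.take kk = ((curr.drop ii).take kk).reverse := by
    rw [List.take_reverse, e2, List.drop_take, e3]
  have hq : prev.reverse.take kk = (prev.drop (prev.length - kk)).reverse := by
    rw [List.take_reverse]
  constructor
  · intro h
    refine ⟨by simp; omega, by simp; omega, ?_⟩
    rw [hdrop, htake, hq, h]
  · rintro ⟨-, -, h⟩
    rw [hdrop, htake, hq, List.reverse_inj] at h
    exact h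

-- strings equal → their hashes equal (slice-level, for the port's hash test)
theorem acond_hash (prev curr : List String) (f : String → UInt64) (ii kk : Nat) (hk : 0 < kk)
    (h : PySem.List.slice curr (some (ii : Int)) (some ((ii : Int) + (kk : Int))) =
      PySem.List.slice prev (some (-(kk : Int))) none) :
    PySem.List.slice (curr.map f) (some (ii : Int)) (some ((ii : Int) + (kk : Int))) =
      PySem.List.slice (prev.map f) (some (-(kk : Int))) none := by
  rw [PySem.List.slice_natCast_add, PySem.List.slice_from_neg_natCast _ _ hk] at h ⊢
  rw [List.length_map, ← List.map_drop, ← List.map_take, ← List.map_drop, h]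

theorem diffInner_none (prev curr : List String) (ch sh : List UInt64) (k : Int) (js : List Int)
    (h : ∀ i ∈ js, PySem.List.slice curr (some i) (some (i + k)) ≠
      PySem.List.slice prev (some (-k)) none) :
    diffInner prev curr ch sh k js = none := by
  induction js with
  | nil => rfl
  | cons i rest ih =>
    have hi := h i (by simp)
    simp only [diffInner]
    split_ifs with h1 <;> exact ih fun j hj => h j (by simp [hj])

theorem diffInner_first (prev curr : List String) (kk ii : Nat) (hk : 0 < kk)
    (pre post : List Int)
    (hpre : ∀ j ∈ pre, PySem.List.slice curr (some j) (some (j + (kk : Int))) ≠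
      PySem.List.slice prev (some (-(kk : Int))) none)
    (hC : PySem.List.slice curr (some (ii : Int)) (some ((ii : Int) + (kk : Int))) =
      PySem.List.slice prev (some (-(kk : Int))) none) :
    diffInner prev curr (curr.map hash)
      (PySem.List.slice (prev.map hash) (some (-(kk : Int))) none) (kk : Int)
      (pre ++ (ii : Int) :: post)
      = some (PySem.List.slice curr (some ((ii : Int) + (kk : Int))) none) := by
  induction pre with
  | nil =>
    simp only [List.nil_append, diffInner,
      if_pos (acond_hash prev curr hash ii kk hk hC), if_pos hC]
  | cons j pre ih =>
    have hj := hpre j (by simp)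
    simp only [List.cons_append, diffInner]
    split_ifs with h1 <;> exact ih fun j' hj' => hpre j' (by simp [hj'])

theorem inner_range_none (prev curr : List String) (ch sh : List UInt64) (b kk : Nat)
    (hk : 0 < kk) (hkP : kk ≤ prev.length) (hkN : kk ≤ curr.length)
    (hmax : ∀ p ≤ curr.length, Zf prev curr p ≤ b) (hbk : b < kk) :
    diffInner prev curr ch sh (kk : Int)
      (PySem.List.pyRange ((curr.length : Int) - (kk : Int)) (-1) (-1)) = none := by
  apply diffInner_none
  intro i hi
  rw [PySem.List.mem_pyRange_neg_one] at hi
  obtain ⟨hi0, hiN⟩ := hi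
  lift i to Nat using (by omega) with ii
  intro hacond
  have hik : ii + kk ≤ curr.length := by omega
  have h1 := (acond_iff prev curr ii kk hk hkP hik).1 hacond
  have h2 := hmax (curr.length - ii - kk) (by omega)
  omega

theorem outer_none (prev curr : List String) (b : Nat)
    (hP : 0 < prev.length) (hN : 0 < curr.length)
    (hmax : ∀ p ≤ curr.length, Zf prev curr p ≤ b)
    (hblo : b < max 1 (min prev.length curr.length / 2 - 1)) :
    ∀ kk₀ : Nat, kk₀ ≤ min prev.length curr.length → (kk₀ = 0 ∨ b < kk₀) →
      diffOuter prev curr (prev.map hash) (curr.map hash)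
        ((min prev.length curr.length : Nat) : Int)
        (PySem.List.pyRange (kk₀ : Int) 0 (-1)) = none := by
  intro kk₀
  induction kk₀ with
  | zero =>
    intro _ _
    rw [PySem.List.pyRange_neg_one_eq_nil (by norm_num)]
    rfl
  | succ kk₀ ih =>
    intro hle hpos
    have hb : b < kk₀ + 1 := by omega
    rw [PySem.List.pyRange_neg_one_cons (by positivity),
      show ((kk₀ + 1 : Nat) : Int) - 1 = (kk₀ : Int) by push_cast; ring]
    have hinner := inner_range_none prev curr (curr.map hash)
      (PySem.List.slice (prev.map hash) (some (-((kk₀ + 1 : Nat) : Int))) none)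
      b (kk₀ + 1) (by omega) (by omega) (by omega) hmax hb
    simp only [diffOuter, PySem.List.len_eq, hinner]
    have hfd : PySem.Int.floordiv ((min prev.length curr.length : Nat) : Int) 2
        = ((min prev.length curr.length / 2 : Nat) : Int) := by
      exact_mod_cast PySem.Int.floordiv_natCast (min prev.length curr.length) 2
    rw [hfd]
    by_cases hsmall : kk₀ + 1 < min prev.length curr.length / 2
    · rw [if_pos (by exact_mod_cast hsmall)]
    · rw [if_neg (by exact_mod_cast hsmall)]
      exact ih (by omega) (by omega)

theorem outer_some (prev curr : List String) (b bp : Nat) (hb1 : 1 ≤ b)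
    (hP : 0 < prev.length) (hN : 0 < curr.length)
    (hZbp : Zf prev curr bp = b)
    (hmax : ∀ p ≤ curr.length, Zf prev curr p ≤ b)
    (hfirst : ∀ p < bp, Zf prev curr p < b)
    (hlo : max 1 (min prev.length curr.length / 2 - 1) ≤ b) :
    ∀ kk₀ : Nat, b ≤ kk₀ → kk₀ ≤ min prev.length curr.length →
      diffOuter prev curr (prev.map hash) (curr.map hash)
        ((min prev.length curr.length : Nat) : Int)
        (PySem.List.pyRange (kk₀ : Int) 0 (-1))
        = some (PySem.List.slice curr (some ((curr.length - bp : Nat) : Int)) none) := by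
  have hbP : b ≤ prev.length := hZbp ▸ Zf_le_prev prev curr bp
  have hbpN : b ≤ curr.length - bp := hZbp ▸ Zf_le_sub prev curr bp
  have hbpN' : bp + b ≤ curr.length := by
    rcases Nat.le_total bp curr.length with h | h
    · omega
    · have := Zf_le_sub prev curr bp; omega
  intro kk₀
  induction kk₀ with
  | zero => intro h1 _; omega
  | succ kk₀ ih =>
    intro hbk hkM
    rw [PySem.List.pyRange_neg_one_cons (by positivity),
      show ((kk₀ + 1 : Nat) : Int) - 1 = (kk₀ : Int) by push_cast; ring]
    rcases Nat.lt_or_ge b (kk₀ + 1) with hlt | hge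
    · -- head kk₀+1 > b: no match at this k, continue
      have hinner := inner_range_none prev curr (curr.map hash)
        (PySem.List.slice (prev.map hash) (some (-((kk₀ + 1 : Nat) : Int))) none)
        b (kk₀ + 1) (by omega) (by omega) (by omega) hmax hlt
      simp only [diffOuter, PySem.List.len_eq, hinner]
      have hfd : PySem.Int.floordiv ((min prev.length curr.length : Nat) : Int) 2
          = ((min prev.length curr.length / 2 : Nat) : Int) := by
        exact_mod_cast PySem.Int.floordiv_natCast (min prev.length curr.length) 2
      rw [hfd, if_neg (by exact_mod_cast by omega : ¬ ((kk₀ + 1 : Nat) : Int) < ((min prev.length curr.length / 2 : Nat) : Int))]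
      exact ih (by omega) (by omega)
    · -- head = b: first match found here
      have hbeq : kk₀ + 1 = b := by omega
      subst hbeq
      have hrange : PySem.List.pyRange ((curr.length : Int) - ((kk₀ + 1 : Nat) : Int)) (-1) (-1)
          = (PySem.List.pyRange (((curr.length - (kk₀ + 1) - bp) + 1 : Nat) : Int)
              (((curr.length - (kk₀ + 1)) + 1 : Nat) : Int) 1).reverse
            ++ ((curr.length - (kk₀ + 1) - bp : Nat) : Int)
              :: (PySem.List.pyRange 0 ((curr.length - (kk₀ + 1) - bp : Nat) : Int) 1).reverse := by
        rw [show (curr.length : Int) - ((kk₀ + 1 : Nat) : Int)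
            = ((curr.length - (kk₀ + 1) : Nat) : Int) by omega]
        rw [PySem.List.pyRange_neg_one_eq_reverse, show ((-1 : Int) + 1) = 0 by ring]
        rw [show (((curr.length - (kk₀ + 1)) + 1 : Nat) : Int)
            = ((curr.length - (kk₀ + 1) : Nat) : Int) + 1 by push_cast; ring,
          PySem.List.pyRange_one_append 0 (((curr.length - (kk₀ + 1) - bp) + 1 : Nat) : Int)
            (((curr.length - (kk₀ + 1) : Nat) : Int) + 1) (by push_cast; omega) (by push_cast; omega)]
        rw [show (((curr.length - (kk₀ + 1) - bp) + 1 : Nat) : Int)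
            = ((curr.length - (kk₀ + 1) - bp : Nat) : Int) + 1 by push_cast; ring,
          PySem.List.pyRange_one_succ_right (by omega)]
        simp
      have hfirstmatch := diffInner_first prev curr (kk₀ + 1) (curr.length - (kk₀ + 1) - bp)
        (by omega)
        ((PySem.List.pyRange (((curr.length - (kk₀ + 1) - bp) + 1 : Nat) : Int)
          (((curr.length - (kk₀ + 1)) + 1 : Nat) : Int) 1).reverse)
        ((PySem.List.pyRange 0 ((curr.length - (kk₀ + 1) - bp : Nat) : Int) 1).reverse)
        (by
          intro j hj
          rw [List.mem_reverse, PySem.List.mem_pyRange_one] at hj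
          obtain ⟨hj1, hj2⟩ := hj
          lift j to Nat using (by omega) with jj
          intro hacond
          have hjj1 : curr.length - (kk₀ + 1) - bp + 1 ≤ jj := by exact_mod_cast hj1
          have hjj2 : jj < curr.length - (kk₀ + 1) + 1 := by exact_mod_cast hj2
          have h1 := (acond_iff prev curr jj (kk₀ + 1) (by omega) (by omega)
            (by omega)).1 hacond
          have h2 := hfirst (curr.length - jj - (kk₀ + 1)) (by omega)
          omega)
        (by
          rw [acond_iff prev curr (curr.length - (kk₀ + 1) - bp) (kk₀ + 1) (by omega)
            (by omega) (by omega)]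
          rw [show curr.length - (curr.length - (kk₀ + 1) - bp) - (kk₀ + 1) = bp by omega,
            hZbp])
      have hcast : ((curr.length - (kk₀ + 1) - bp : Nat) : Int) + ((kk₀ + 1 : Nat) : Int)
          = ((curr.length - bp : Nat) : Int) := by push_cast; omega
      simp only [diffOuter, PySem.List.len_eq]
      rw [hrange, hfirstmatch, hcast]

-- ————— A's value, packaged (the two branches of the old equivalence proof) —————

theorem A_eq_curr (prev curr : List String) (b : Nat)
    (hprev : prev ≠ []) (hcurr : curr ≠ [])
    (hmax : ∀ p ≤ curr.length, Zf prev curr p ≤ b)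
    (hblo : b < max 1 (min prev.length curr.length / 2 - 1)) :
    diff_new_lines prev curr = curr := by
  have hP : 0 < prev.length := List.length_pos_of_ne_nil hprev
  have hN : 0 < curr.length := List.length_pos_of_ne_nil hcurr
  unfold diff_new_lines
  rw [if_neg hprev, if_neg hcurr]
  have hminc : min (PySem.List.len prev) (PySem.List.len curr)
      = ((min prev.length curr.length : Nat) : Int) := by
    simp [PySem.List.len_eq]
  simp only [hminc]
  rw [outer_none prev curr b hP hN hmax hblo (min prev.length curr.length) le_rfl (by omega)]

theorem A_eq_cut (prev curr : List String) (b bp : Nat) (hb1 : 1 ≤ b)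
    (hprev : prev ≠ []) (hcurr : curr ≠ [])
    (hZbp : Zf prev curr bp = b)
    (hmax : ∀ p ≤ curr.length, Zf prev curr p ≤ b)
    (hfirst : ∀ p < bp, Zf prev curr p < b)
    (hlo : max 1 (min prev.length curr.length / 2 - 1) ≤ b) :
    diff_new_lines prev curr = PySem.List.slice curr (some ((curr.length - bp : Nat) : Int)) none := by
  have hP : 0 < prev.length := List.length_pos_of_ne_nil hprev
  have hN : 0 < curr.length := List.length_pos_of_ne_nil hcurr
  have hbM : b ≤ min prev.length curr.length := by
    have h1 := hZbp ▸ Zf_le_prev prev curr bp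
    have h2 := hZbp ▸ Zf_le_sub prev curr bp
    omega
  unfold diff_new_lines
  rw [if_neg hprev, if_neg hcurr]
  have hminc : min (PySem.List.len prev) (PySem.List.len curr)
      = ((min prev.length curr.length : Nat) : Int) := by
    simp [PySem.List.len_eq]
  simp only [hminc]
  rw [outer_some prev curr b bp hb1 hP hN hZbp hmax hfirst hlo
    (min prev.length curr.length) hbM le_rfl]

-- ————— B's value: the backward sweep computes the first maximum of Zf —————

theorem runLen_go (prev curr : List String) (e : Nat) (he : e ≤ curr.length) (k : Nat) :
    runLen prev curr e k
      = k + lcpZ ((((curr.take e).reverse).drop k).zip (prev.reverse.drop k)) := by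
  fun_induction runLen prev curr e k with
  | case1 k h ih =>
    obtain ⟨hke, hkp, heq⟩ := h
    have hlt1 : k < ((curr.take e).reverse).length := by simp; omega
    have hlt2 : k < (prev.reverse).length := by simp; omega
    have hR : ((curr.take e).reverse)[k]? = curr[e - 1 - k]? := by
      rw [List.getElem?_reverse (by simp; omega)]
      rw [List.getElem?_take_of_lt (by simp; omega)]
      congr 1
      simp; omega
    have hQ : (prev.reverse)[k]? = prev[prev.length - 1 - k]? := by
      rw [List.getElem?_reverse (by omega)]
    have hgc : PySem.List.pyGet? curr ((e : Int) - 1 - (k : Int)) = curr[e - 1 - k]? := by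
      rw [show (e : Int) - 1 - (k : Int) = ((e - 1 - k : Nat) : Int) by omega]
      simp
    have hgp : PySem.List.pyGet? prev (-1 - (k : Int)) = prev[prev.length - 1 - k]? := by
      rw [show (-1 - (k : Int)) = -((k + 1 : Nat) : Int) by push_cast; ring]
      rw [PySem.List.pyGet?_neg_natCast _ _ (by omega) (by omega)]
      congr 1
      omega
    have h1 : ((curr.take e).reverse)[k]? = (prev.reverse)[k]? := by
      rw [hR, hQ, ← hgc, ← hgp, heq]
    rw [List.getElem?_eq_getElem hlt1, List.getElem?_eq_getElem hlt2] at h1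
    have hRQ := Option.some.inj h1
    rw [ih, List.drop_eq_getElem_cons hlt1, List.drop_eq_getElem_cons hlt2]
    simp only [List.zip_cons_cons, lcpZ]
    rw [if_pos hRQ]
    omega
  | case2 k h =>
    rcases Decidable.not_and_iff_or_not.1 h with hke | h2
    · have : ((curr.take e).reverse).drop k = [] := by
        apply List.drop_eq_nil_of_le
        simp; omega
      simp [this, lcpZ]
    rcases Decidable.not_and_iff_or_not.1 h2 with hkp | hne
    · have : (prev.reverse).drop k = [] := by
        apply List.drop_eq_nil_of_le
        simp; omega
      simp [this, lcpZ]
    · -- both indices in range but the two lines differ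
      by_cases hke' : k < e
      case neg =>
        have : ((curr.take e).reverse).drop k = [] := by
          apply List.drop_eq_nil_of_le
          simp; omega
        simp [this, lcpZ]
      by_cases hkp' : k < prev.length
      case neg =>
        have : (prev.reverse).drop k = [] := by
          apply List.drop_eq_nil_of_le
          simp; omega
        simp [this, lcpZ]
      have hlt1 : k < ((curr.take e).reverse).length := by simp; omega
      have hlt2 : k < (prev.reverse).length := by simp; omega
      have hR : ((curr.take e).reverse)[k]? = curr[e - 1 - k]? := by
        rw [List.getElem?_reverse (by simp; omega)]
        rw [List.getElem?_take_of_lt (by simp; omega)]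
        congr 1
        simp; omega
      have hQ : (prev.reverse)[k]? = prev[prev.length - 1 - k]? := by
        rw [List.getElem?_reverse (by omega)]
      have hgc : PySem.List.pyGet? curr ((e : Int) - 1 - (k : Int)) = curr[e - 1 - k]? := by
        rw [show (e : Int) - 1 - (k : Int) = ((e - 1 - k : Nat) : Int) by omega]
        simp
      have hgp : PySem.List.pyGet? prev (-1 - (k : Int)) = prev[prev.length - 1 - k]? := by
        rw [show (-1 - (k : Int)) = -((k + 1 : Nat) : Int) by push_cast; ring]
        rw [PySem.List.pyGet?_neg_natCast _ _ (by omega) (by omega)]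
        congr 1
        omega
      have hne' : ¬ ((curr.take e).reverse)[k] = (prev.reverse)[k] := by
        intro hcontra
        apply hne
        rw [hgc, hgp, ← hR, ← hQ]
        rw [List.getElem?_eq_getElem hlt1, List.getElem?_eq_getElem hlt2, hcontra]
      rw [List.drop_eq_getElem_cons hlt1, List.drop_eq_getElem_cons hlt2]
      simp only [List.zip_cons_cons, lcpZ]
      rw [if_neg hne']
      omega
  termination_by e - k

theorem runLen_eq_Zf (prev curr : List String) (e : Nat) (he : e ≤ curr.length) :
    runLen prev curr e 0 = Zf prev curr (curr.length - e) := by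
  rw [runLen_go prev curr e he 0, Zf]
  have : curr.reverse.drop (curr.length - e) = (curr.take e).reverse := by
    rw [List.drop_reverse]
    congr 2
    omega
  simp [this]

theorem altGo_run (prev curr : List String) :
    ∀ (e best cut : Nat), e ≤ curr.length →
    (∀ p, p + e < curr.length → Zf prev curr p ≤ best) →
    (best = 0 ∧ cut = 0 ∨ (1 ≤ best ∧ ∃ bp, bp + e < curr.length ∧ Zf prev curr bp = best ∧
      cut = curr.length - bp ∧ ∀ p < bp, Zf prev curr p < best)) →
    (∀ p ≤ curr.length, Zf prev curr p ≤ (altGo prev curr best cut e).1) ∧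
    ((altGo prev curr best cut e).1 = 0 ∧ (altGo prev curr best cut e).2 = 0 ∨
     (1 ≤ (altGo prev curr best cut e).1 ∧ ∃ bp, bp < curr.length ∧
       Zf prev curr bp = (altGo prev curr best cut e).1 ∧
       (altGo prev curr best cut e).2 = curr.length - bp ∧
       ∀ p < bp, Zf prev curr p < (altGo prev curr best cut e).1)) := by
  intro e
  induction e with
  | zero =>
    intro best cut _ hmax hwit
    constructor
    · intro p hp
      rcases Nat.lt_or_ge p curr.length with h | h
      · exact hmax p (by omega)
      · have := Zf_le_sub prev curr p
        simp only [altGo]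
        omega
    · simp only [altGo]
      rcases hwit with h | ⟨h1, bp, hbp, hZ, hcut, hfirst⟩
      · exact Or.inl h
      · exact Or.inr ⟨h1, bp, by omega, hZ, hcut, hfirst⟩
  | succ e ih =>
    intro best cut he hmax hwit
    by_cases h1 : e + 1 ≤ best
    · simp only [altGo, if_pos h1]
      constructor
      · intro p hp
        rcases Nat.lt_or_ge (p + (e + 1)) curr.length with h | h
        · exact hmax p h
        · have := Zf_le_sub prev curr p
          omega
      · rcases hwit with ⟨hb0, _⟩ | ⟨hb1, bp, hbp, hZ, hcut, hfirst⟩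
        · omega
        · exact Or.inr ⟨hb1, bp, by omega, hZ, hcut, hfirst⟩
    · simp only [altGo, if_neg h1]
      have hrl : runLen prev curr (e + 1) 0 = Zf prev curr (curr.length - (e + 1)) :=
        runLen_eq_Zf prev curr (e + 1) he
      by_cases h2 : best < runLen prev curr (e + 1) 0
      · simp only [if_pos h2]
        apply ih _ _ (by omega)
        · intro p hp
          rcases Nat.lt_or_ge (p + (e + 1)) curr.length with h | h
          · exact le_of_lt (lt_of_le_of_lt (hmax p h) h2)
          · have hpe : p = curr.length - (e + 1) := by omega
            rw [hpe, ← hrl]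
        · refine Or.inr ⟨by omega, curr.length - (e + 1), by omega, by rw [← hrl], by omega, ?_⟩
          intro p hp
          exact lt_of_le_of_lt (hmax p (by omega)) h2
      · simp only [if_neg h2]
        apply ih _ _ (by omega)
        · intro p hp
          rcases Nat.lt_or_ge (p + (e + 1)) curr.length with h | h
          · exact hmax p h
          · have hpe : p = curr.length - (e + 1) := by omega
            rw [hpe, ← hrl]
            omega
        · rcases hwit with h | ⟨hb1, bp, hbp, hZ, hcut, hfirst⟩
          · exact Or.inl h
          · exact Or.inr ⟨hb1, bp, by omega, hZ, hcut, hfirst⟩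

-- ————— the change region D_ in Zf language —————

-- a list of length k is an infix exactly when it appears as a window
theorem infix_iff_window {α : Type} [DecidableEq α] (pat xs : List α) :
    pat <:+: xs ↔ ∃ i, i + pat.length ≤ xs.length ∧ (xs.drop i).take pat.length = pat := by
  constructor
  · rintro ⟨s, t, rfl⟩
    refine ⟨s.length, by simp, ?_⟩
    rw [List.append_assoc, List.drop_left, List.take_left]
  · rintro ⟨i, hik, hw⟩
    refine ⟨xs.take i, (xs.drop i).drop pat.length, ?_⟩
    calc xs.take i ++ pat ++ (xs.drop i).drop pat.length
        = xs.take i ++ ((xs.drop i).take pat.length ++ (xs.drop i).drop pat.length) := by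
          rw [List.append_assoc, hw]
      _ = xs := by rw [List.take_append_drop, List.take_append_drop]

-- the tail window condition as a bound on Zf
theorem window_iff_Zf (prev curr : List String) (kk : Nat) (hk : 0 < kk)
    (hkp : kk ≤ prev.length) :
    (prev.drop (prev.length - kk)) <:+: curr ↔
    ∃ p ≤ curr.length, kk ≤ Zf prev curr p := by
  have hlen : (prev.drop (prev.length - kk)).length = kk := by simp; omega
  rw [infix_iff_window, hlen]
  constructor
  · rintro ⟨i, hik, hw⟩
    refine ⟨curr.length - i - kk, by omega, ?_⟩
    rw [Zf, lcpZ_ge_iff]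
    have e1 : curr.length - (curr.length - i - kk) = i + kk := by omega
    have hdrop : curr.reverse.drop (curr.length - i - kk) = (curr.take (i + kk)).reverse := by
      rw [List.drop_reverse, e1]
    have e2 : (curr.take (i + kk)).length - kk = i := by simp; omega
    have e3 : i + kk - i = kk := by omega
    have htake : (curr.take (i + kk)).reverse.take kk = ((curr.drop i).take kk).reverse := by
      rw [List.take_reverse, e2, List.drop_take, e3]
    have hq : prev.reverse.take kk = (prev.drop (prev.length - kk)).reverse := by
      rw [List.take_reverse]
    refine ⟨by simp <;> omega, by simp <;> omega, ?_⟩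
    rw [hdrop, htake, hq, hw]
  · rintro ⟨p, hp, hZ⟩
    have h1 := Zf_le_sub prev curr p
    refine ⟨curr.length - p - kk, by omega, ?_⟩
    rw [Zf, lcpZ_ge_iff] at hZ
    obtain ⟨hz1, hz2, hw⟩ := hZ
    have hz1' : kk ≤ curr.length - p := by simpa using hz1
    have e1 : curr.length - p ≤ curr.length := by omega
    have hdrop : curr.reverse.drop p = (curr.take (curr.length - p)).reverse := by
      rw [List.drop_reverse]
    have e2 : (curr.take (curr.length - p)).length - kk = curr.length - p - kk := by simp <;> omega
    have htake : (curr.take (curr.length - p)).reverse.take kk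
        = ((curr.drop (curr.length - p - kk)).take kk).reverse := by
      rw [List.take_reverse, e2]
      congr 1
      rw [List.drop_take]
      congr 1
      omega
    have hq : prev.reverse.take kk = (prev.drop (prev.length - kk)).reverse := by
      rw [List.take_reverse]
    rw [hdrop, htake, hq, List.reverse_inj] at hw
    exact hw

-- D_ holds exactly when the best match length lies in [1, max 1 (mk/2 - 1))
theorem D_iff_best (prev curr : List String) (b bp : Nat)
    (hZbp : Zf prev curr bp = b) (hbp : bp ≤ curr.length)
    (hmax : ∀ p ≤ curr.length, Zf prev curr p ≤ b) :
    D_diff_new_lines prev curr ↔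
      (prev ≠ [] ∧ 1 ≤ b ∧ b < max 1 (min prev.length curr.length / 2 - 1)) := by
  unfold D_diff_new_lines
  constructor
  · rintro ⟨hprev, h1, hlo⟩
    have hP : 0 < prev.length := List.length_pos_of_ne_nil hprev
    rw [window_iff_Zf prev curr 1 (by omega) (by omega)] at h1
    obtain ⟨p, hp, hZ⟩ := h1
    have hb1 : 1 ≤ b := le_trans hZ (hmax p hp)
    refine ⟨hprev, hb1, ?_⟩
    by_contra hge
    push_neg at hge
    apply hlo
    set lo := max 1 (min prev.length curr.length / 2 - 1) with hlodef
    have hcN : 0 < curr.length := by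
      have := Zf_le_sub prev curr p
      omega
    have hloP : lo ≤ prev.length := by
      have : lo ≤ min prev.length curr.length ∨ lo = 1 := by
        rcases Nat.le_total (min prev.length curr.length / 2) 1 with h | h
        · right; omega
        · left; omega
      rcases this with h | h
      · omega
      · omega
    rw [window_iff_Zf prev curr lo (by omega) hloP]
    exact ⟨bp, hbp, by omega⟩
  · rintro ⟨hprev, hb1, hlo⟩
    have hP : 0 < prev.length := List.length_pos_of_ne_nil hprev
    have hbpZ := Zf_le_sub prev curr bp
    have hcN : 0 < curr.length := by omega
    refine ⟨hprev, ?_, ?_⟩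
    · rw [window_iff_Zf prev curr 1 (by omega) (by omega)]
      exact ⟨bp, hbp, by omega⟩
    · set lo := max 1 (min prev.length curr.length / 2 - 1) with hlodef
      have hloP : lo ≤ prev.length := by
        have : lo ≤ min prev.length curr.length ∨ lo = 1 := by
          rcases Nat.le_total (min prev.length curr.length / 2) 1 with h | h
          · right; omega
          · left; omega
        rcases this with h | h
        · omega
        · omega
      rw [window_iff_Zf prev curr lo (by omega) hloP]
      rintro ⟨p, hp, hZ⟩
      have := hmax p hp
      omega

-- Zf is identically 0 when prev is empty
theorem Zf_nil (curr : List String) (p : Nat) : Zf [] curr p = 0 := by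
  have := Zf_le_prev [] curr p
  simpa using this

-- ————— the three delivered theorems —————

theorem unchanged_main (prev curr : List String) (hnd : ¬ D_diff_new_lines prev curr) :
    diff_new_lines prev curr = diff_new_lines_alt prev curr := by
  have halt : diff_new_lines_alt prev curr
      = PySem.List.slice curr (some (((altGo prev curr 0 0 curr.length).2 : Nat) : Int)) none := rfl
  rw [halt]
  obtain ⟨hmax, hwit⟩ := altGo_run prev curr curr.length 0 0 le_rfl
    (by intro p hp; omega) (Or.inl ⟨rfl, rfl⟩)
  set s := altGo prev curr 0 0 curr.length with hs
  rcases hwit with ⟨hb0, hc0⟩ | ⟨hb1, bp, hbp, hZ, hcut, hfirst⟩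
  · -- no match at all: both return curr
    rw [hc0]
    rw [show ((0 : Nat) : Int) = ((0 : Nat) : Int) from rfl, PySem.List.slice_from_natCast, List.drop_zero]
    by_cases hprev : prev = []
    · unfold diff_new_lines
      rw [if_pos hprev]
    by_cases hcurr : curr = []
    · unfold diff_new_lines
      rw [if_neg hprev, if_pos hcurr, hcurr]
    rw [A_eq_curr prev curr 0 hprev hcurr (by intro p hp; have := hmax p hp; omega)
      (by have : 1 ≤ max 1 (min prev.length curr.length / 2 - 1) := le_max_left _ _; omega)]
  · -- a match exists: since ¬D_, it reaches A's cutoff, and both cut at the same place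
    have hprev : prev ≠ [] := by
      intro h
      rw [h] at hZ
      rw [Zf_nil] at hZ
      omega
    have hcurr : curr ≠ [] := by
      intro h
      rw [h] at hbp
      simp at hbp
    have hge : max 1 (min prev.length curr.length / 2 - 1) ≤ s.1 := by
      by_contra hlt
      push_neg at hlt
      exact hnd ((D_iff_best prev curr s.1 bp hZ (by omega) hmax).2 ⟨hprev, hb1, hlt⟩)
    rw [A_eq_cut prev curr s.1 bp hb1 hprev hcurr hZ hmax hfirst hge, hcut]

theorem tight_main (prev curr : List String) (hd : D_diff_new_lines prev curr) :
    diff_new_lines prev curr ≠ diff_new_lines_alt prev curr := by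
  have halt : diff_new_lines_alt prev curr
      = PySem.List.slice curr (some (((altGo prev curr 0 0 curr.length).2 : Nat) : Int)) none := rfl
  rw [halt]
  obtain ⟨hmax, hwit⟩ := altGo_run prev curr curr.length 0 0 le_rfl
    (by intro p hp; omega) (Or.inl ⟨rfl, rfl⟩)
  set s := altGo prev curr 0 0 curr.length with hs
  rcases hwit with ⟨hb0, hc0⟩ | ⟨hb1, bp, hbp, hZ, hcut, hfirst⟩
  · -- impossible: D_ guarantees a nonempty match
    exfalso
    obtain ⟨hprev, h1, -⟩ := hd
    have hP : 0 < prev.length := List.length_pos_of_ne_nil hprev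
    rw [window_iff_Zf prev curr 1 (by omega) (by omega)] at h1
    obtain ⟨p, hp, hZ1⟩ := h1
    have := hmax p hp
    omega
  · have hprev : prev ≠ [] := by
      intro h
      rw [h] at hZ
      rw [Zf_nil] at hZ
      omega
    have hcurr : curr ≠ [] := by
      intro h
      rw [h] at hbp
      simp at hbp
    have hlt : s.1 < max 1 (min prev.length curr.length / 2 - 1) := by
      by_contra hge
      push_neg at hge
      have := (D_iff_best prev curr s.1 bp hZ (by omega) hmax).1 hd
      omega
    rw [A_eq_curr prev curr s.1 hprev hcurr hmax hlt, hcut]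
    have hbplt : bp < curr.length := by
      have := Zf_le_sub prev curr bp
      omega
    intro hcontra
    have hlen : curr.length = (PySem.List.slice curr (some ((curr.length - bp : Nat) : Int)) none).length := by
      rw [← hcontra]
    rw [PySem.List.slice_from_natCast] at hlen
    simp at hlen
    omega

-- ===== VERDICT (by name: the statements are the Claim_ definitions above) =====

theorem diff_new_lines_spec : Claim_unchanged_diff_new_lines := by
  intro prev curr _
  unfold Spec_diff_new_lines
  intro hnd
  exact unchanged_main prev curr hnd

theorem diff_new_lines_changed : Claim_changed_diff_new_lines := by
  unfold Claim_changed_diff_new_lines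
  refine ⟨by decide, by decide, ?_, ?_, by decide⟩
  · exact A_eq_curr (pvDiffWitness_diff_new_lines.1) (pvDiffWitness_diff_new_lines.2) 1
      (by decide) (by decide) (by decide) (by decide)
  · simp [diff_new_lines_alt, altGo, runLen, PySem.List.pyGet?, PySem.List.pyIdx?,
      PySem.List.slice, pvDiffWitness_diff_new_lines, pvDiffWitnessOut_diff_new_lines]

theorem diff_new_lines_tight : Claim_exact_diff_new_lines := by
  intro prev curr _ hd
  exact tight_main prev curr hd
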